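-- pv_equiv track=rewrite | github.com/etfrenchvcu/thesis | src/umls.py | extend_lineage
-- ===== SOURCE A (Python) =====
-- def flatten(list):
--     "Flatten a 2D list into 1D"
--     return set([item for sublist in list for item in sublist])
--
-- def parent_bfs(cuis, parent_dict):
--     "Gets a unique set of parents for the list of CUIs"
--     parents = []
--     for cui in cuis:
--         if cui in parent_dict:
--             parents += [c for _,c in parent_dict[cui]]
--     return set(parents)
--
-- def extend_lineage(l_given, l_compare, parent_dict):
--     "Extend a lineage up one level and check if the LCA is found"
--     d = None
--     reached_root = False
--
--     # Breadth First Search next level of parents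
--     parents = parent_bfs(l_given[-1], parent_dict)
--     parents = parents.difference(flatten(l_given))
--
--     if len(parents) > 0:
--         # Check for common ancestors (only need to check parents)
--         common_ancestors = flatten(l_compare).intersection(parents)
--         if len(common_ancestors) > 0:
--             for i, level in enumerate(l_compare):
--                 if not level.isdisjoint(parents):
--                     d = len(l_given) + i
--                     break
--         l_given.append(parents)
--     else:
--         reached_root = True
--
--     # Return extended lineage and distance if found
--     return l_given, d, reached_root
-- ===== SOURCE B (Python) =====
-- def flatten(list):
--     "Flatten a 2D list into 1D"
--     return set([item for sublist in list for item in sublist])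
--
-- def parent_bfs(cuis, parent_dict):
--     "Gets a unique set of parents for the list of CUIs"
--     parents = []
--     for cui in cuis:
--         if cui in parent_dict:
--             parents += [c for _, c in parent_dict[cui]]
--     return set(parents)
--
-- def extend_lineage(l_given, l_compare, parent_dict):
--     "Extend a lineage up one level and check if the LCA is found"
--     d = None
--     reached_root = False
--
--     # Breadth First Search next level of parents (same step as before)
--     parents = parent_bfs(l_given[-1], parent_dict).difference(flatten(l_given))
--
--     if len(parents) > 0:
--         # Earliest-level index per CUI of l_compare (first occurrence wins),
--         # built once; replaces the flatten/intersection guard and level scan.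
--         earliest = {}
--         for i, level in enumerate(l_compare):
--             for c in level:
--                 if c not in earliest:
--                     earliest[c] = i
--         hits = [earliest[c] for c in parents if c in earliest]
--         if hits:
--             d = len(l_given) + min(hits)
--         l_given.append(parents)
--     else:
--         reached_root = True
--
--     return l_given, d, reached_root
-- ===== Notes on version B (the rewrite author's own statement) =====
-- stated objective: alternative
-- what changed: The flatten(l_compare) intersection guard plus the enumerate-and-break scan of levels against the parent set is replaced by a single earliest-level-index dict over l_compare (first occurrence wins) from which the distance is read off as len(l_given) + min of the indices of the parents that occur in it.
import Mathlib
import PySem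

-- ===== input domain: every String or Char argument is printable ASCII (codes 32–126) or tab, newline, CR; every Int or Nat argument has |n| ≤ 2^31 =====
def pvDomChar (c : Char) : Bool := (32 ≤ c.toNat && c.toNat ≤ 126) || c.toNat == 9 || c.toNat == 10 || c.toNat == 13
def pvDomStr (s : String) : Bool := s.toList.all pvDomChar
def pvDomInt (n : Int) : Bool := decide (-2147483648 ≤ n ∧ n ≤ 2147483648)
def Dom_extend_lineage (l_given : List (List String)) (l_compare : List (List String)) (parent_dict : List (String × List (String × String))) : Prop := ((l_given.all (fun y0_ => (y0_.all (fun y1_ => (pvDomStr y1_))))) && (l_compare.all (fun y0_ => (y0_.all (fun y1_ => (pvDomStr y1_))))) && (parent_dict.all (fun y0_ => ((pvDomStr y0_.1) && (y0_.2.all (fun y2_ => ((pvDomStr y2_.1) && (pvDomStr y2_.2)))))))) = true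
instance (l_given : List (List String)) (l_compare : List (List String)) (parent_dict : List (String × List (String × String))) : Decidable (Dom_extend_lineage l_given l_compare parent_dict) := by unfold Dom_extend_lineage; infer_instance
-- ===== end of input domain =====

-- B replaces A's flatten(l_compare)∩parents guard and break-scan of levels by an
-- earliest-level-index dict plus a min over the parents' indices (alternative
-- decomposition, same result); equivalence is about the RETURN value only
-- (Python A and B both append to l_given in place).


-- ===== PORT A =====
-- shared helpers: literal ports of the module helpers flatten / parent_bfs
-- (identical code in Source A and Source B)
def pvFlatten (l : List (List String)) : PySem.Set String :=
  PySem.Set.ofList l.flatten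

def pvParentBfs (cuis : List String) (parent_dict : List (String × List (String × String))) : PySem.Set String :=
  PySem.Set.ofList (cuis.foldl (fun parents cui =>
    if (PySem.Dict.mk parent_dict).contains cui then
      parents ++ ((PySem.Dict.mk parent_dict).getD cui []).map (fun p => p.2)
    else parents) [])

-- A's 'for i, level in enumerate(l_compare): if not level.isdisjoint(parents): d = len(l_given)+i; break'
def pvScanA (lenG : Nat) (parents : PySem.Set String) : List (List String) → Nat → Option Int
  | [], _ => none
  | lvl :: rest, i =>
    if ¬ PySem.Set.isdisjoint lvl parents then some ((lenG + i : Nat) : Int)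
    else pvScanA lenG parents rest (i + 1)

def extend_lineage (l_given : List (List String)) (l_compare : List (List String)) (parent_dict : List (String × List (String × String))) : List (List String) × Option Int × Bool :=
  match PySem.List.pyGet? l_given (-1) with
  | none => (l_given, none, false)   -- l_given[-1] raises IndexError: outside Pre_
  | some last =>
    let parents := PySem.Set.diff (pvParentBfs last parent_dict) (pvFlatten l_given)
    if 0 < PySem.Set.len parents then
      let common := PySem.Set.inter (pvFlatten l_compare) parents
      let d : Option Int :=
        if 0 < PySem.Set.len common then pvScanA l_given.length parents l_compare 0 else none
      (l_given ++ [parents], d, false)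
    else (l_given, none, true)

-- ===== PORT B =====
-- 'for i, level in enumerate(l_compare): for c in level: if c not in earliest: earliest[c] = i'
def pvEarliest : List (List String) → PySem.Dict String Int → Int → PySem.Dict String Int
  | [], d, _ => d
  | lvl :: rest, d, i =>
    pvEarliest rest (lvl.foldl (fun d c => if d.contains c then d else d.insert c i) d) (i + 1)

def extend_lineage_alt (l_given : List (List String)) (l_compare : List (List String)) (parent_dict : List (String × List (String × String))) : List (List String) × Option Int × Bool :=
  match PySem.List.pyGet? l_given (-1) with
  | none => (l_given, none, false)   -- l_given[-1] raises IndexError: outside Pre_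
  | some last =>
    let parents := PySem.Set.diff (pvParentBfs last parent_dict) (pvFlatten l_given)
    if 0 < PySem.Set.len parents then
      let earliest := pvEarliest l_compare PySem.Dict.empty 0
      let hits : List Int := parents.foldl (fun acc c =>
        match earliest.get? c with
        | some i => acc ++ [i]
        | none => acc) []
      let d : Option Int :=
        match PySem.List.min? hits (fun x => x) with
        | some m => some ((l_given.length : Int) + m)
        | none => none
      (l_given ++ [parents], d, false)
    else (l_given, none, true)

-- ===== PRECONDITION & SPEC =====
-- Pre_ excludes only l_given = [], on which Python A raises IndexError at l_given[-1].
def Pre_extend_lineage (l_given : List (List String)) (l_compare : List (List String)) (parent_dict : List (String × List (String × String))) : Prop := l_given ≠ []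
instance (l_given : List (List String)) (l_compare : List (List String)) (parent_dict : List (String × List (String × String))) : Decidable (Pre_extend_lineage l_given l_compare parent_dict) := by unfold Pre_extend_lineage; infer_instance
def pvWitness_extend_lineage : List (List String) × List (List String) × (List (String × List (String × String))) :=
  ([["C1"]], [["C2"]], [("C1", [("PAR", "C2")])])

def Spec_extend_lineage (l_given : List (List String)) (l_compare : List (List String)) (parent_dict : List (String × List (String × String))) (out : List (List String) × Option Int × Bool) : Prop := out = extend_lineage_alt l_given l_compare parent_dict
instance (l_given : List (List String)) (l_compare : List (List String)) (parent_dict : List (String × List (String × String))) (out : List (List String) × Option Int × Bool) : Decidable (Spec_extend_lineage l_given l_compare parent_dict out) := by unfold Spec_extend_lineage; infer_instance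

-- ===== CLAIM (what is proved, stated in full; the proofs are below) =====
def Claim_equal_extend_lineage : Prop := ∀ (l_given : List (List String)) (l_compare : List (List String)) (parent_dict : List (String × List (String × String))), Dom_extend_lineage l_given l_compare parent_dict → Pre_extend_lineage l_given l_compare parent_dict → Spec_extend_lineage l_given l_compare parent_dict (extend_lineage l_given l_compare parent_dict)

-- ===== LEMMAS AND PROOFS =====

-- scratch: lemmas
def pvOff (b : Int) (o : Option Nat) : Option Int := o.map (fun j : Nat => b + (j : Int))

theorem pvOff_shift (b : Int) (o : Option Nat) :
    pvOff b (o.map (fun i => i + 1)) = pvOff (b + 1) o := by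
  cases o with
  | none => rfl
  | some j => simp [pvOff]; ring

theorem pvScanA_eq (lenG : Nat) (parents : PySem.Set String) :
    ∀ (levels : List (List String)) (i : Nat),
      pvScanA lenG parents levels i
        = pvOff ((lenG : Int) + (i : Int)) (levels.findIdx? (fun lvl => !PySem.Set.isdisjoint lvl parents)) := by
  intro levels
  induction levels with
  | nil => intro i; simp [pvScanA, pvOff]
  | cons lvl rest ih =>
    intro i
    rw [pvScanA, List.findIdx?_cons]
    by_cases h : PySem.Set.isdisjoint lvl parents
    · rw [if_neg (by simp [h]), ih (i + 1)]
      simp only [h, Bool.not_true, Bool.false_eq_true, if_false, pvOff_shift]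
      congr 1
    · rw [if_pos h]
      simp only [Bool.not_eq_true] at *
      simp only [h, Bool.not_false, if_true, pvOff, Option.map_some]
      congr 1
theorem pvEarliest_level (i : Int) (c : String) :
    ∀ (lvl : List String) (d : PySem.Dict String Int),
      (lvl.foldl (fun d c => if d.contains c then d else d.insert c i) d).get? c
        = (d.get? c).or (if lvl.contains c then some i else none) := by
  intro lvl
  induction lvl with
  | nil => intro d; simp
  | cons c' t ih =>
    intro d
    simp only [List.foldl_cons, ih, List.contains_cons]
    by_cases hc : d.contains c'
    · rw [if_pos hc]
      by_cases he : c = c'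
      · subst he
        obtain ⟨v, hv⟩ : ∃ v, d.get? c = some v :=
          Option.isSome_iff_exists.mp
            (by rw [← PySem.Dict.contains_eq_isSome_get?]; exact hc)
        simp [hv]
      · have : (c' == c) = false := by simp [beq_iff_eq]; exact fun h => he h.symm
        simp [this, he]
    · rw [if_neg hc, PySem.Dict.get?_insert]
      by_cases he : c = c'
      · subst he
        have h0 : d.get? c = none :=
          (PySem.Dict.get?_eq_none_iff_contains d c).mpr (by simpa using hc)
        simp [h0]
      · have : (c' == c) = false := by simp [beq_iff_eq]; exact fun h => he h.symm
        simp [this, he]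

theorem pvEarliest_get (c : String) :
    ∀ (levels : List (List String)) (d : PySem.Dict String Int) (i : Int),
      (pvEarliest levels d i).get? c
        = (d.get? c).or (pvOff i (levels.findIdx? (fun lvl => lvl.contains c))) := by
  intro levels
  induction levels with
  | nil => intro d i; simp [pvEarliest, pvOff]
  | cons lvl rest ih =>
    intro d i
    rw [pvEarliest, ih, pvEarliest_level, List.findIdx?_cons]
    by_cases h : lvl.contains c
    · have hm : c ∈ lvl := by simpa using h
      simp [hm, pvOff]
    · simp only [h, Bool.false_eq_true, if_false, Option.or_none, pvOff_shift, Option.or_assoc]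
theorem pvHits_eq (earliest : PySem.Dict String Int) (parents : List String) :
    ∀ (acc : List Int),
      parents.foldl (fun acc c =>
        match earliest.get? c with
        | some i => acc ++ [i]
        | none => acc) acc
        = acc ++ parents.filterMap (fun c => earliest.get? c) := by
  induction parents with
  | nil => intro acc; simp
  | cons c t ih =>
    intro acc
    simp only [List.foldl_cons, List.filterMap_cons]
    cases h : earliest.get? c with
    | none => simp [h, ih]
    | some i => simp [h, ih]

theorem min?_of_lb {xs : List Int} {b : Int} (hmem : b ∈ xs) (hlb : ∀ x ∈ xs, b ≤ x) :
    PySem.List.min? xs (fun x => x) = some b := by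
  cases h : PySem.List.min? xs (fun x => x) with
  | none =>
    rw [PySem.List.min?_eq_none_iff] at h
    subst h; simp at hmem
  | some m =>
    have h1 : m ∈ xs := PySem.List.min?_mem h
    have h2 : m ≤ b := by simpa using PySem.List.min?_isMin h b hmem
    have h3 : b ≤ m := hlb m h1
    rw [le_antisymm h2 h3]

theorem pvBridge (parents : List String) :
    ∀ (levels : List (List String)) (b : Int),
      PySem.List.min? (parents.filterMap (fun c =>
          pvOff b (levels.findIdx? (fun lvl => lvl.contains c)))) (fun x => x)
        = pvOff b (levels.findIdx? (fun lvl => !PySem.Set.isdisjoint lvl parents)) := by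
  intro levels
  induction levels with
  | nil =>
    intro b
    simp only [List.findIdx?_nil, pvOff, Option.map_none]
    rw [List.filterMap_congr (g := fun _ => (none : Option Int)) (fun c _ => rfl)]
    simp [PySem.List.min?]
  | cons lvl rest ih =>
    intro b
    simp only [List.findIdx?_cons]
    by_cases h : PySem.Set.isdisjoint lvl parents
    · have hnc : ∀ c ∈ parents, lvl.contains c = false := by
        intro c hc
        by_contra hcc
        simp only [Bool.not_eq_false, List.contains_eq_mem, decide_eq_true_eq] at hcc
        exact ((PySem.Set.isdisjoint_iff lvl parents).mp h c hcc) hc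
      have hcongr : parents.filterMap (fun c =>
            pvOff b (if lvl.contains c then some 0
              else (rest.findIdx? (fun l => l.contains c)).map (fun i => i + 1)))
          = parents.filterMap (fun c =>
            pvOff (b + 1) (rest.findIdx? (fun l => l.contains c))) := by
        apply List.filterMap_congr
        intro c hc
        rw [hnc c hc]
        simp only [Bool.false_eq_true, if_false, pvOff_shift]
      rw [hcongr, ih (b + 1)]
      simp only [h, Bool.not_true, Bool.false_eq_true, if_false, pvOff_shift]
    · rw [Bool.not_eq_true] at h
      have hex : ∃ c0, c0 ∈ lvl ∧ c0 ∈ parents := by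
        by_contra hno
        push_neg at hno
        exact absurd ((PySem.Set.isdisjoint_iff lvl parents).mpr (fun x hx => hno x hx))
          (by simp [h])
      obtain ⟨c0, hc0l, hc0p⟩ := hex
      simp only [h, Bool.not_false, if_true, pvOff, Option.map_some, Nat.cast_zero, add_zero]
      apply min?_of_lb
      · rw [List.mem_filterMap]
        refine ⟨c0, hc0p, ?_⟩
        have hm : lvl.contains c0 = true := by simp [List.contains_eq_mem, hc0l]
        rw [hm]
        simp
      · intro x hx
        rw [List.mem_filterMap] at hx
        obtain ⟨c, _, hc⟩ := hx
        by_cases hl : lvl.contains c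
        · rw [hl] at hc
          simp at hc
          omega
        · rw [Bool.not_eq_true] at hl
          rw [hl] at hc
          simp only [Bool.false_eq_true, if_false, Option.map_map] at hc
          cases hoc : (rest.findIdx? (fun l => l.contains c)) with
          | none => rw [hoc] at hc; simp at hc
          | some j =>
            rw [hoc] at hc
            simp at hc
            omega
theorem pvGuard (levels : List (List String)) (parents : PySem.Set String) :
    (0 < PySem.Set.len (PySem.Set.inter (pvFlatten levels) parents))
      ↔ (levels.findIdx? (fun lvl => !PySem.Set.isdisjoint lvl parents)).isSome := by
  rw [PySem.Set.len]
  constructor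
  · intro h
    have hne : PySem.Set.inter (pvFlatten levels) parents ≠ [] := by
      intro he; rw [he] at h; simp at h
    obtain ⟨x, hx⟩ := List.exists_mem_of_ne_nil _ hne
    obtain ⟨hxf, hxp⟩ := (PySem.Set.mem_inter (pvFlatten levels) parents x).mp hx
    have hxfl : x ∈ levels.flatten := by
      have : x ∈ PySem.Set.ofList levels.flatten := hxf
      simpa [PySem.Set.mem_ofList] using this
    obtain ⟨lvl, hlv, hxin⟩ := List.mem_flatten.mp hxfl
    rw [List.findIdx?_isSome]
    refine List.any_eq_true.mpr ⟨lvl, hlv, ?_⟩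
    simp only [Bool.not_eq_true']
    rw [Bool.eq_false_iff]
    intro hdis
    exact ((PySem.Set.isdisjoint_iff lvl parents).mp hdis x hxin) hxp
  · intro h
    rw [List.findIdx?_isSome] at h
    obtain ⟨lvl, hlv, hp⟩ := List.any_eq_true.mp h
    rw [Bool.not_eq_true'] at hp
    have hex : ∃ c0, c0 ∈ lvl ∧ c0 ∈ parents := by
      by_contra hno
      push_neg at hno
      exact absurd ((PySem.Set.isdisjoint_iff lvl parents).mpr (fun x hx => hno x hx))
        (by simp [hp])
    obtain ⟨c0, hc0l, hc0p⟩ := hex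
    have hmem : c0 ∈ PySem.Set.inter (pvFlatten levels) parents := by
      rw [PySem.Set.mem_inter]
      exact ⟨by rw [pvFlatten, PySem.Set.mem_ofList]; exact List.mem_flatten.mpr ⟨lvl, hlv, hc0l⟩, hc0p⟩
    have := List.length_pos_of_mem hmem
    omega

theorem pvDist_eq (lenG : Nat) (parents : PySem.Set String) (levels : List (List String)) :
    (if 0 < PySem.Set.len (PySem.Set.inter (pvFlatten levels) parents)
      then pvScanA lenG parents levels 0 else none)
      = (match PySem.List.min? (parents.foldl (fun acc c =>
            match (pvEarliest levels PySem.Dict.empty 0).get? c with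
            | some i => acc ++ [i]
            | none => acc) []) (fun x => x) with
        | some m => some ((lenG : Int) + m)
        | none => none) := by
  have hhits : (parents.foldl (fun acc c =>
        match (pvEarliest levels PySem.Dict.empty 0).get? c with
        | some i => acc ++ [i]
        | none => acc) [])
      = parents.filterMap (fun c => pvOff 0 (levels.findIdx? (fun lvl => lvl.contains c))) := by
    rw [pvHits_eq]
    simp only [List.nil_append]
    apply List.filterMap_congr
    intro c _
    rw [pvEarliest_get]
    simp
  rw [hhits, pvBridge]
  by_cases hg : (0 : Int) < PySem.Set.len (PySem.Set.inter (pvFlatten levels) parents)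
  · obtain ⟨j, hj⟩ := Option.isSome_iff_exists.mp ((pvGuard levels parents).mp hg)
    rw [if_pos hg, pvScanA_eq, hj]
    simp only [pvOff, Option.map_some]
    push_cast
    ring_nf
  · rw [if_neg hg]
    cases hf : levels.findIdx? (fun lvl => !PySem.Set.isdisjoint lvl parents) with
    | none => simp [pvOff]
    | some j =>
      exact absurd ((pvGuard levels parents).mpr (by rw [hf]; rfl)) hg
-- ===== VERDICT (by name: the statement is the Claim_ definition above) =====
theorem extend_lineage_spec : Claim_equal_extend_lineage := by
  intro l_given l_compare parent_dict _ _
  unfold Spec_extend_lineage extend_lineage extend_lineage_alt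
  cases PySem.List.pyGet? l_given (-1) with
  | none => rfl
  | some last =>
    simp only
    by_cases hp : 0 < PySem.Set.len (PySem.Set.diff (pvParentBfs last parent_dict) (pvFlatten l_given))
    · rw [if_pos hp, if_pos hp, pvDist_eq]
    · rw [if_neg hp, if_neg hp]
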